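-- pv_equiv track=rewrite | github.com/devyuseon/problem-solving | boj/1439.py | solution
-- ===== SOURCE A (Python) =====
-- def solution(string: str):
--     status = string[0]
--     zero_cnt = 0
--     one_cnt = 0
--
--     for i in range(1, len(string)):
--         if status == string[i]:
--             continue
--         else:
--             if status == '0':
--                 zero_cnt += 1
--             if status == '1':
--                 one_cnt += 1
--             status = string[i]
--
--     if status == '0': zero_cnt += 1
--     if status == '1': one_cnt += 1
--
--     return(min(zero_cnt, one_cnt))
-- ===== SOURCE B (Python) =====
-- def solution(string: str):
--     # count maximal runs of '0' and of '1' directly (a position starts a run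
--     # iff it holds ch and its predecessor does not); answer is the smaller count
--     def runs(ch):
--         if not string:
--             return 0
--         first = 1 if string[0] == ch else 0
--         return first + sum(1 for prev, c in zip(string, string[1:]) if c == ch and prev != ch)
--     return min(runs('0'), runs('1'))
-- ===== Notes on version B (the rewrite author's own statement) =====
-- stated objective: simpler
-- what changed: B drops A's status variable and boundary/final bookkeeping and instead counts run starts of '0' and '1' directly by comparing each character with its predecessor (zip of the string with its tail), taking the min of the two run counts.
-- crash fix: On the empty string A raises IndexError (string[0]); B returns 0 (zero runs of either kind). — e.g. on solution(""): A raises IndexError, B returns 0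
import Mathlib
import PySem

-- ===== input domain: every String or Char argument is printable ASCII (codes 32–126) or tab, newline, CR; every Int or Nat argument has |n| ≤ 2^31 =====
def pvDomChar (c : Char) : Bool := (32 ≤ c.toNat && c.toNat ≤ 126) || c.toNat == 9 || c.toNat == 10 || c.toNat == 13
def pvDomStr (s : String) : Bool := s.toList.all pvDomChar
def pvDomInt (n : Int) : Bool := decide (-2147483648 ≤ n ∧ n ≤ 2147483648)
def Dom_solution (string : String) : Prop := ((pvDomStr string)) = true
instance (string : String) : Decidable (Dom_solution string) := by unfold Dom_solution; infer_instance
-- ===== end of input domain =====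

-- B replaces A's status/double-counter loop by directly counting run starts of '0' and '1'
-- (compare each character with its predecessor) and taking the min: simpler, same O(n) cost.

-- ===== PORT A =====
-- A's loop body: on a mismatch, bump the counter of the run that just ended and move status on.
def solStepA (acc : Char × Int × Int) (c : Char) : Char × Int × Int :=
  if acc.1 = c then acc
  else
    let zc := if acc.1 = '0' then acc.2.1 + 1 else acc.2.1
    let oc := if acc.1 = '1' then acc.2.2 + 1 else acc.2.2
    (c, zc, oc)

def solution (string : String) : Int :=
  let cs := string.toList
  match PySem.List.pyGet? cs 0 with
  | none => 0   -- Python raises IndexError here (empty string); excluded by Pre_solution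
  | some st0 =>
    let r := (PySem.List.pyRange 1 (PySem.List.len cs) 1).foldl
      (fun acc i => solStepA acc (PySem.List.pyGetD cs i ' ')) (st0, 0, 0)
    let zc := if r.1 = '0' then r.2.1 + 1 else r.2.1
    let oc := if r.1 = '1' then r.2.2 + 1 else r.2.2
    min zc oc

-- ===== PORT B =====
-- number of maximal runs of ch: first char (if ch) plus positions holding ch whose predecessor differs
def solRunsB (cs : List Char) (ch : Char) : Int :=
  match cs with
  | [] => 0
  | c0 :: _ =>
    (if c0 = ch then 1 else 0)
      + ((cs.zip (cs.drop 1)).countP (fun pc => pc.2 == ch && pc.1 != ch) : Int)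

def solution_alt (string : String) : Int :=
  let cs := string.toList
  min (solRunsB cs '0') (solRunsB cs '1')

-- ===== PRECONDITION & SPEC =====
-- Pre_ excludes only the empty string, on which A raises IndexError at string[0].
def Pre_solution (string : String) : Prop := string ≠ ""
instance (string : String) : Decidable (Pre_solution string) := by unfold Pre_solution; infer_instance
def pvWitness_solution : String := "1101001"

-- On the empty string A raises IndexError (string[0]); B returns 0 (zero runs of either kind).
def Raises_solution (string : String) : Prop := string = ""
instance (string : String) : Decidable (Raises_solution string) := by unfold Raises_solution; infer_instance
def pvRaiseWitness_solution : String := ""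
def pvRaiseWitnessOut_solution : Int := 0

def Spec_solution (string : String) (out : Int) : Prop := out = solution_alt string
instance (string : String) (out : Int) : Decidable (Spec_solution string out) := by unfold Spec_solution; infer_instance

-- ===== CLAIM (what is proved, stated in full; the proofs are below) =====
def Claim_equal_solution : Prop := ∀ (string : String), Dom_solution string → Pre_solution string → Spec_solution string (solution string)
def Claim_raises_solution : Prop := (∀ (string : String), Dom_solution string → Raises_solution string → ¬ Pre_solution string) ∧ (Dom_solution (pvRaiseWitness_solution) ∧ Raises_solution (pvRaiseWitness_solution) ∧ solution_alt (pvRaiseWitness_solution) = pvRaiseWitnessOut_solution)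

-- ===== LEMMAS AND PROOFS =====

-- B's run count of ch in st::l, written over the proof-side decomposition
def solCnt (ch st : Char) (l : List Char) : Int :=
  (if st = ch then 1 else 0)
    + (((st :: l).zip l).countP (fun pc => pc.2 == ch && pc.1 != ch) : Int)

lemma solRunsB_cons (c0 : Char) (rest : List Char) (ch : Char) :
    solRunsB (c0 :: rest) ch = solCnt ch c0 rest := by
  simp [solRunsB, solCnt]

-- the main loop invariant: folding A's step and then closing the last run
-- computes exactly the initial counter plus B's run count
lemma solFoldA (l : List Char) : ∀ (st : Char) (z o : Int),
    (if (l.foldl solStepA (st, z, o)).1 = '0'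
       then (l.foldl solStepA (st, z, o)).2.1 + 1 else (l.foldl solStepA (st, z, o)).2.1)
      = z + solCnt '0' st l
    ∧ (if (l.foldl solStepA (st, z, o)).1 = '1'
       then (l.foldl solStepA (st, z, o)).2.2 + 1 else (l.foldl solStepA (st, z, o)).2.2)
      = o + solCnt '1' st l := by
  induction l with
  | nil =>
    intro st z o
    constructor <;> simp [solCnt] <;> split <;> ring
  | cons c t ih =>
    intro st z o
    by_cases hsc : st = c
    · subst hsc
      have := ih st z o
      simp only [List.foldl_cons]
      rw [show solStepA (st, z, o) st = (st, z, o) from by simp [solStepA]]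
      refine ⟨?_, ?_⟩
      · rw [this.1]; simp [solCnt]
      · rw [this.2]; simp [solCnt]
    · simp only [List.foldl_cons, solStepA, if_neg hsc]
      have := ih c (if st = '0' then z + 1 else z) (if st = '1' then o + 1 else o)
      refine ⟨?_, ?_⟩
      · rw [this.1]; simp [solCnt]
        split_ifs <;> simp_all <;> ring
      · rw [this.2]; simp [solCnt]
        split_ifs <;> simp_all <;> ring

lemma solution_eq_alt (string : String) (h : string ≠ "") :
    solution string = solution_alt string := by
  have hcs : string.toList ≠ [] := by
    intro hc
    exact h (String.toList_eq_nil_iff.mp hc)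
  obtain ⟨c0, rest, hr⟩ := List.exists_cons_of_ne_nil hcs
  have hget : PySem.List.pyGet? string.toList 0 = some c0 := by
    rw [hr]; simp [PySem.List.pyGet?, PySem.List.pyIdx?]
  have hfold : (PySem.List.pyRange 1 (PySem.List.len string.toList) 1).foldl
      (fun acc i => solStepA acc (PySem.List.pyGetD string.toList i ' ')) (c0, 0, 0)
      = rest.foldl solStepA (c0, 0, 0) := by
    have := PySem.List.foldl_pyRange_pyGetD (xs := string.toList) (a := 1) (d := ' ')
      (f := solStepA) (init := ((c0 : Char), (0 : Int), (0 : Int))) (by norm_num)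
    rw [this, hr]
    simp
  have hmain := solFoldA rest c0 0 0
  simp only [solution, hget, hfold]
  simp only [solution_alt, hr, solRunsB_cons]
  rw [hmain.1, hmain.2]
  simp

-- ===== VERDICT (by name: the statement is the Claim_ definition above) =====
theorem solution_spec : Claim_equal_solution := by
  intro string _ hpre
  unfold Spec_solution
  exact solution_eq_alt string hpre

theorem solution_raises : Claim_raises_solution := by
  unfold Claim_raises_solution
  exact ⟨fun s _ hr hp => hp hr, by decide⟩

-- self-check: B's port really returns the stated value at the raise witness
theorem pvRaiseWitness_solution_ok :
    solution_alt pvRaiseWitness_solution = pvRaiseWitnessOut_solution := by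
  have h := solution_raises
  unfold Claim_raises_solution at h
  exact h.2.2.2
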